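-- pv_equiv track=rewrite | github.com/theabbie/leetcode | miscellaneous/G_Triple_Index.py | mos_algorithm
-- ===== SOURCE A (Python) =====
-- import math
-- from collections import defaultdict
--
-- def mos_algorithm(arr, queries):
--     block_size = int(math.sqrt(len(arr)))
--     sorted_queries = sorted(enumerate(queries), key = lambda x: x[1][0] // block_size)
--     left, right, val = 0, -1, 0
--     frequency = defaultdict(int)
--     results = [0] * len(queries)
--     for query_index, (query_left, query_right) in sorted_queries:
--         while left > query_left:
--             left -= 1
--             val += frequency[arr[left]] * (frequency[arr[left]] - 1) // 2
--             frequency[arr[left]] += 1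
--         while right < query_right:
--             right += 1
--             val += frequency[arr[right]] * (frequency[arr[right]] - 1) // 2
--             frequency[arr[right]] += 1
--         while left < query_left:
--             frequency[arr[left]] -= 1
--             val -= frequency[arr[left]] * (frequency[arr[left]] - 1) // 2
--             left += 1
--         while right > query_right:
--             frequency[arr[right]] -= 1
--             val -= frequency[arr[right]] * (frequency[arr[right]] - 1) // 2
--             right -= 1
--         results[query_index] = val
--     return results
-- ===== SOURCE B (Python) =====
-- from collections import Counter
--
-- def mos_algorithm(arr, queries):
--     results = []
--     for left, right in queries:
--         counts = Counter(arr[i] for i in range(left, right + 1))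
--         results.append(sum(c * (c - 1) * (c - 2) // 6 for c in counts.values()))
--     return results
-- ===== Notes on version B (the rewrite author's own statement) =====
-- stated objective: simpler
-- what changed: Replaces Mo's offline query-sorted sliding window with shared incremental frequency/value state by an independent per-query recount: build a Counter of the queried slice and sum C(count,3) over its values; Pre_ keeps negative-index queries but excludes reversed ranges r<l-1 (unspecified subarray, A returns leftover-counter numbers, B returns 0).
-- outside the precondition, e.g. on mos_algorithm([1, 1, 1], [(2, 0)]): A returns [-1], B returns [0]
import Mathlib
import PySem

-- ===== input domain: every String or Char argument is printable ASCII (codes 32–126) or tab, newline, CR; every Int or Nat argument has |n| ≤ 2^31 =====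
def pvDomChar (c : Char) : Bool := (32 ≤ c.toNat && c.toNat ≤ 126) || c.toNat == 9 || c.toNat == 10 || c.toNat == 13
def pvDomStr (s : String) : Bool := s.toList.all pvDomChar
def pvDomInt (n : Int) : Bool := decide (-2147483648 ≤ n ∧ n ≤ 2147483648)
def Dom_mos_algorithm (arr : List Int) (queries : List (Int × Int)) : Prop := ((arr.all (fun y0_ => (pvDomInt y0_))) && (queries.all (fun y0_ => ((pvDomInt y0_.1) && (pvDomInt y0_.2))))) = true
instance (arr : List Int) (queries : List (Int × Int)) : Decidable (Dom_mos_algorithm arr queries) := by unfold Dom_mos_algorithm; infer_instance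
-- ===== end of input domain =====

-- B replaces Mo's offline query-sorted shared sliding-window state by an independent
-- per-query recount (Counter of the queried slice, sum of C(count,3)): simpler, not faster.

-- ===== PORT A =====
-- while left > query_left: left -= 1; val += f*(f-1)//2; frequency[arr[left]] += 1

def moAddLeft (arr : List Int) (ql left : Int) (freq : PySem.Dict Int Int) (val : Int) :
    Int × PySem.Dict Int Int × Int :=
  if h : ql < left then
    let l' := left - 1
    let x := PySem.List.pyGetD arr l' 0
    let f := freq.getD x 0
    moAddLeft arr ql l' (freq.insert x (f + 1)) (val + PySem.Int.floordiv (f * (f - 1)) 2)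
  else (left, freq, val)
termination_by (left - ql).toNat
decreasing_by omega

-- while right < query_right: right += 1; val += f*(f-1)//2; frequency[arr[right]] += 1
def moAddRight (arr : List Int) (qr right : Int) (freq : PySem.Dict Int Int) (val : Int) :
    Int × PySem.Dict Int Int × Int :=
  if h : right < qr then
    let r' := right + 1
    let x := PySem.List.pyGetD arr r' 0
    let f := freq.getD x 0
    moAddRight arr qr r' (freq.insert x (f + 1)) (val + PySem.Int.floordiv (f * (f - 1)) 2)
  else (right, freq, val)
termination_by (qr - right).toNat
decreasing_by omega

-- while left < query_left: frequency[arr[left]] -= 1; val -= f*(f-1)//2; left += 1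
def moDelLeft (arr : List Int) (ql left : Int) (freq : PySem.Dict Int Int) (val : Int) :
    Int × PySem.Dict Int Int × Int :=
  if h : left < ql then
    let x := PySem.List.pyGetD arr left 0
    let f := freq.getD x 0 - 1
    moDelLeft arr ql (left + 1) (freq.insert x f) (val - PySem.Int.floordiv (f * (f - 1)) 2)
  else (left, freq, val)
termination_by (ql - left).toNat
decreasing_by omega

-- while right > query_right: frequency[arr[right]] -= 1; val -= f*(f-1)//2; right -= 1
def moDelRight (arr : List Int) (qr right : Int) (freq : PySem.Dict Int Int) (val : Int) :
    Int × PySem.Dict Int Int × Int :=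
  if h : qr < right then
    let x := PySem.List.pyGetD arr right 0
    let f := freq.getD x 0 - 1
    moDelRight arr qr (right - 1) (freq.insert x f) (val - PySem.Int.floordiv (f * (f - 1)) 2)
  else (right, freq, val)
termination_by (right - qr).toNat
decreasing_by omega

-- the body of A's main loop; state = (left, right, frequency, val, results)
def moStep (arr : List Int) (st : Int × Int × PySem.Dict Int Int × Int × List Int)
    (q : Int × Int × Int) : Int × Int × PySem.Dict Int Int × Int × List Int :=
  let s1 := moAddLeft arr q.2.1 st.1 st.2.2.1 st.2.2.2.1
  let s2 := moAddRight arr q.2.2 st.2.1 s1.2.1 s1.2.2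
  let s3 := moDelLeft arr q.2.1 s1.1 s2.2.1 s2.2.2
  let s4 := moDelRight arr q.2.2 s2.1 s3.2.1 s3.2.2
  (s3.1, s4.1, s4.2.1, s4.2.2, PySem.List.pySetD st.2.2.2.2 q.1 s4.2.2)

-- int(math.sqrt(len(arr))) is exact (= Nat.sqrt) for the lengths at hand
def mos_algorithm (arr : List Int) (queries : List (Int × Int)) : List Int :=
  let block_size : Int := (Nat.sqrt arr.length : Int)
  let sorted_queries := PySem.List.sorted (PySem.List.enumerate queries)
    (fun x => PySem.Int.floordiv x.2.1 block_size)
  (sorted_queries.foldl (moStep arr)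
    (0, -1, PySem.Dict.empty, 0, List.replicate queries.length 0)).2.2.2.2

-- ===== PORT B =====
def mos_algorithm_alt (arr : List Int) (queries : List (Int × Int)) : List Int :=
  queries.map (fun q =>
    let counts := PySem.Dict.counter
      ((PySem.List.pyRange q.1 (q.2 + 1)).map (fun i => PySem.List.pyGetD arr i 0))
    (counts.values.map (fun c => PySem.Int.floordiv (c * (c - 1) * (c - 2)) 6)).sum)

-- ===== PRECONDITION & SPEC =====
-- Pre_ excludes: queries on an empty arr (A's sort key raises ZeroDivisionError), query indices
-- outside [-n, n) (A raises IndexError), and reversed ranges r < l - 1 — queries naming a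
-- subarray that does not exist, for which no value is specified: there A still returns a number
-- (leftover negative sliding-window counters, e.g. [-1] on ([1,1,1], [(2,0)])) while B returns 0;
-- negative-l queries in [-n, -1] (Python wraparound) ARE inside Pre_ and proved equal.
def Pre_mos_algorithm (arr : List Int) (queries : List (Int × Int)) : Prop :=
  (queries = [] ∨ arr ≠ []) ∧
  ∀ q ∈ queries, -(arr.length : Int) ≤ q.1 ∧ q.1 ≤ q.2 + 1 ∧ q.2 < (arr.length : Int)
instance (arr : List Int) (queries : List (Int × Int)) : Decidable (Pre_mos_algorithm arr queries) := by
  unfold Pre_mos_algorithm; infer_instance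

def pvWitness_mos_algorithm : List Int × (List (Int × Int)) := ([1, 2, 1, 1], [(0, 3), (-2, 1), (1, 0), (2, 2)])

def Spec_mos_algorithm (arr : List Int) (queries : List (Int × Int)) (out : List Int) : Prop := out = mos_algorithm_alt arr queries
instance (arr : List Int) (queries : List (Int × Int)) (out : List Int) : Decidable (Spec_mos_algorithm arr queries out) := by unfold Spec_mos_algorithm; infer_instance

-- ===== CLAIM (what is proved, stated in full; the proofs are below) =====
def Claim_equal_mos_algorithm : Prop := ∀ (arr : List Int) (queries : List (Int × Int)), Dom_mos_algorithm arr queries → Pre_mos_algorithm arr queries → Spec_mos_algorithm arr queries (mos_algorithm arr queries)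

-- ===== LEMMAS AND PROOFS =====

def pvC2 (c : Int) : Int := PySem.Int.floordiv (c * (c - 1)) 2

def pvC3 (c : Int) : Int := PySem.Int.floordiv (c * (c - 1) * (c - 2)) 6

lemma pvC3_succ (c : Int) : pvC3 (c + 1) = pvC3 c + pvC2 c := by
  have h2 : (2:Int) ∣ c * (c - 1) := by
    have := Int.even_mul_succ_self (c - 1)
    simpa [mul_comm, sub_add_cancel] using this.two_dvd
  have h6 : ∀ d : Int, (6:Int) ∣ d * (d - 1) * (d - 2) := by
    intro d
    have hz : ∀ x : ZMod 6, x * (x - 1) * (x - 2) = 0 := by decide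
    have := (ZMod.intCast_zmod_eq_zero_iff_dvd (d * (d - 1) * (d - 2)) 6).mp (by push_cast; exact hz d)
    exact_mod_cast this
  obtain ⟨k, hk⟩ := h2
  obtain ⟨b, hb⟩ := h6 c
  obtain ⟨a, ha⟩ := h6 (c + 1)
  have e1 : pvC3 (c + 1) = a := by
    simp only [pvC3, PySem.Int.floordiv_eq_ediv_of_pos (by norm_num : (0:Int) < 6), ha]
    exact Int.mul_ediv_cancel_left a (by norm_num)
  have e2 : pvC3 c = b := by
    simp only [pvC3, PySem.Int.floordiv_eq_ediv_of_pos (by norm_num : (0:Int) < 6), hb]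
    exact Int.mul_ediv_cancel_left b (by norm_num)
  have e3 : pvC2 c = k := by
    simp only [pvC2, PySem.Int.floordiv_eq_ediv_of_pos (by norm_num : (0:Int) < 2), hk]
    exact Int.mul_ediv_cancel_left k (by norm_num)
  have key : 6 * a = 6 * b + 6 * k := by nlinarith [ha, hb, hk]
  rw [e1, e2, e3]; omega

def pvT (xs : List Int) : Int := ∑ v ∈ xs.toFinset, pvC3 (xs.count v : Int)

lemma pvT_append (xs : List Int) (x : Int) :
    pvT (xs ++ [x]) = pvT xs + pvC2 (xs.count x : Int) := by
  classical
  unfold pvT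
  have hcount : ∀ v : Int, (xs ++ [x]).count v = xs.count v + if x = v then 1 else 0 := by
    intro v; simp [List.count_append, List.count_cons]
  by_cases hx : x ∈ xs
  · have hmem : x ∈ xs.toFinset := List.mem_toFinset.mpr hx
    have hts : (xs ++ [x]).toFinset = xs.toFinset := by
      simp [List.toFinset_append, Finset.insert_eq_self.mpr hmem]
    rw [hts, ← Finset.add_sum_erase _ _ hmem, ← Finset.add_sum_erase _ _ hmem]
    have hsum : ∑ v ∈ xs.toFinset.erase x, pvC3 (((xs ++ [x]).count v : Nat) : Int) =
        ∑ v ∈ xs.toFinset.erase x, pvC3 ((xs.count v : Nat) : Int) := by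
      refine Finset.sum_congr rfl ?_
      intro v hv
      have hne : x ≠ v := fun h => (Finset.mem_erase.mp hv).1 h.symm
      rw [hcount v, if_neg hne, Nat.add_zero]
    rw [hsum, hcount x, if_pos rfl]
    have : ((xs.count x + 1 : Nat) : Int) = (xs.count x : Int) + 1 := by push_cast; ring
    rw [this, pvC3_succ]
    ring
  · have hmem : x ∉ xs.toFinset := fun h => hx (List.mem_toFinset.mp h)
    have hts : (xs ++ [x]).toFinset = insert x xs.toFinset := by
      simp [List.toFinset_append]
    rw [hts, Finset.sum_insert hmem]
    have hx0 : xs.count x = 0 := List.count_eq_zero_of_not_mem hx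
    have hsum : ∑ v ∈ xs.toFinset, pvC3 (((xs ++ [x]).count v : Nat) : Int) =
        ∑ v ∈ xs.toFinset, pvC3 ((xs.count v : Nat) : Int) := by
      refine Finset.sum_congr rfl ?_
      intro v hv
      have hne : x ≠ v := fun h => hmem (h ▸ hv)
      rw [hcount v, if_neg hne, Nat.add_zero]
    rw [hsum, hcount x, if_pos rfl, hx0]
    have h1 : pvC3 ((((0:Nat) + 1 : Nat)) : Int) = 0 := by decide
    have h2 : pvC2 ((0:Nat) : Int) = 0 := by decide
    rw [h1, h2]
    ring

lemma pvT_cons (xs : List Int) (x : Int) :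
    pvT (x :: xs) = pvT xs + pvC2 (xs.count x : Int) := by
  have hperm : (xs ++ [x]).Perm (x :: xs) := List.perm_append_singleton x xs
  have : pvT (xs ++ [x]) = pvT (x :: xs) := by
    unfold pvT
    rw [List.toFinset_eq_of_perm _ _ hperm]
    refine Finset.sum_congr rfl ?_
    intro v _
    rw [hperm.count_eq]
  rw [← this, pvT_append]

def pvWin (arr : List Int) (l r : Int) : List Int :=
  (PySem.List.pyRange l (r + 1)).map (fun i => PySem.List.pyGetD arr i 0)

lemma pvWin_succ_right (arr : List Int) (l r : Int) (h : l ≤ r + 1) :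
    pvWin arr l (r + 1) = pvWin arr l r ++ [PySem.List.pyGetD arr (r + 1) 0] := by
  unfold pvWin
  rw [PySem.List.pyRange_one_succ_right h, List.map_append]
  rfl

lemma pvWin_cons_left (arr : List Int) (l r : Int) (h : l ≤ r + 1) :
    pvWin arr (l - 1) r = PySem.List.pyGetD arr (l - 1) 0 :: pvWin arr l r := by
  unfold pvWin
  rw [PySem.List.pyRange_one_cons (by omega : l - 1 < r + 1)]
  norm_num

def pvInv (arr : List Int) (l r : Int) (freq : PySem.Dict Int Int) (val : Int) : Prop :=
  (∀ v : Int, freq.getD v 0 = ((pvWin arr l r).count v : Int)) ∧ val = pvT (pvWin arr l r)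

-- copy of port A loop for scratch

lemma moAddLeft_spec (arr : List Int) (r ql : Int) :
    ∀ (n : Nat) (l : Int) (freq : PySem.Dict Int Int) (val : Int),
      (l - ql).toNat ≤ n → ql ≤ l → l ≤ r + 1 → pvInv arr l r freq val →
      (moAddLeft arr ql l freq val).1 = ql ∧
      pvInv arr ql r (moAddLeft arr ql l freq val).2.1 (moAddLeft arr ql l freq val).2.2 := by
  intro n
  induction n with
  | zero =>
    intro l freq val h0 h1 h2 hInv
    have hl : l = ql := by omega
    subst hl
    rw [moAddLeft, dif_neg (by omega)]
    exact ⟨rfl, hInv⟩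
  | succ n ih =>
    intro l freq val h0 h1 h2 hInv
    by_cases h : ql < l
    · rw [moAddLeft, dif_pos h]
      have hwin : pvWin arr (l - 1) r = PySem.List.pyGetD arr (l - 1) 0 :: pvWin arr l r :=
        pvWin_cons_left arr l r h2
      set x := PySem.List.pyGetD arr (l - 1) 0 with hx
      refine ih (l - 1) _ _ (by omega) (by omega) (by omega) ?_
      constructor
      · intro v
        rw [PySem.Dict.getD_insert, hwin, List.count_cons]
        by_cases hv : v = x
        · rw [hv, if_pos rfl, hInv.1 x]; simp
        · rw [if_neg hv, hInv.1 v]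
          simp [Ne.symm hv]
      · rw [hwin, pvT_cons, ← hInv.2, hInv.1 x]
        rfl
    · have hl : l = ql := by omega
      subst hl
      rw [moAddLeft, dif_neg (by omega)]
      exact ⟨rfl, hInv⟩

lemma moAddRight_spec (arr : List Int) (l qr : Int) :
    ∀ (n : Nat) (r : Int) (freq : PySem.Dict Int Int) (val : Int),
      (qr - r).toNat ≤ n → r ≤ qr → l ≤ r + 1 → pvInv arr l r freq val →
      (moAddRight arr qr r freq val).1 = qr ∧
      pvInv arr l qr (moAddRight arr qr r freq val).2.1 (moAddRight arr qr r freq val).2.2 := by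
  intro n
  induction n with
  | zero =>
    intro r freq val h0 h1 h2 hInv
    have hr : r = qr := by omega
    subst hr
    rw [moAddRight, dif_neg (by omega)]
    exact ⟨rfl, hInv⟩
  | succ n ih =>
    intro r freq val h0 h1 h2 hInv
    by_cases h : r < qr
    · rw [moAddRight, dif_pos h]
      have hwin : pvWin arr l (r + 1) = pvWin arr l r ++ [PySem.List.pyGetD arr (r + 1) 0] :=
        pvWin_succ_right arr l r h2
      set x := PySem.List.pyGetD arr (r + 1) 0 with hx
      refine ih (r + 1) _ _ (by omega) (by omega) (by omega) ?_
      constructor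
      · intro v
        rw [PySem.Dict.getD_insert, hwin, List.count_append, List.count_cons]
        by_cases hv : v = x
        · rw [hv, if_pos rfl, hInv.1 x]; simp
        · rw [if_neg hv, hInv.1 v]; simp [Ne.symm hv]
      · rw [hwin, pvT_append, ← hInv.2, hInv.1 x]
        rfl
    · have hr : r = qr := by omega
      subst hr
      rw [moAddRight, dif_neg (by omega)]
      exact ⟨rfl, hInv⟩

lemma moDelLeft_spec (arr : List Int) (r ql : Int) :
    ∀ (n : Nat) (l : Int) (freq : PySem.Dict Int Int) (val : Int),
      (ql - l).toNat ≤ n → l ≤ ql → ql ≤ r + 1 → pvInv arr l r freq val →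
      (moDelLeft arr ql l freq val).1 = ql ∧
      pvInv arr ql r (moDelLeft arr ql l freq val).2.1 (moDelLeft arr ql l freq val).2.2 := by
  intro n
  induction n with
  | zero =>
    intro l freq val h0 h1 h2 hInv
    have hl : l = ql := by omega
    subst hl
    rw [moDelLeft, dif_neg (by omega)]
    exact ⟨rfl, hInv⟩
  | succ n ih =>
    intro l freq val h0 h1 h2 hInv
    by_cases h : l < ql
    · rw [moDelLeft, dif_pos h]
      have hwin : pvWin arr l r = PySem.List.pyGetD arr l 0 :: pvWin arr (l + 1) r := by
        have := pvWin_cons_left arr (l + 1) r (by omega)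
        norm_num at this
        exact this
      set x := PySem.List.pyGetD arr l 0 with hx
      have hcx : (pvWin arr l r).count x = (pvWin arr (l + 1) r).count x + 1 := by
        rw [hwin, List.count_cons]; simp
      have hf : freq.getD x 0 - 1 = ((pvWin arr (l + 1) r).count x : Int) := by
        rw [hInv.1 x, hcx]; push_cast; ring
      refine ih (l + 1) _ _ (by omega) (by omega) h2 ?_
      constructor
      · intro v
        rw [PySem.Dict.getD_insert]
        by_cases hv : v = x
        · rw [hv, if_pos rfl, hf]
        · rw [if_neg hv, hInv.1 v, hwin, List.count_cons]
          simp [Ne.symm hv]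
      · have hv2 : val = pvT (pvWin arr (l + 1) r) + pvC2 ((pvWin arr (l + 1) r).count x : Int) := by
          rw [hInv.2, hwin, pvT_cons]
        rw [hf, hv2]
        unfold pvC2
        ring
    · have hl : l = ql := by omega
      subst hl
      rw [moDelLeft, dif_neg (by omega)]
      exact ⟨rfl, hInv⟩

lemma moDelRight_spec (arr : List Int) (l qr : Int) :
    ∀ (n : Nat) (r : Int) (freq : PySem.Dict Int Int) (val : Int),
      (r - qr).toNat ≤ n → qr ≤ r → l ≤ qr + 1 → pvInv arr l r freq val →
      (moDelRight arr qr r freq val).1 = qr ∧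
      pvInv arr l qr (moDelRight arr qr r freq val).2.1 (moDelRight arr qr r freq val).2.2 := by
  intro n
  induction n with
  | zero =>
    intro r freq val h0 h1 h2 hInv
    have hr : r = qr := by omega
    subst hr
    rw [moDelRight, dif_neg (by omega)]
    exact ⟨rfl, hInv⟩
  | succ n ih =>
    intro r freq val h0 h1 h2 hInv
    by_cases h : qr < r
    · rw [moDelRight, dif_pos h]
      have hwin : pvWin arr l r = pvWin arr l (r - 1) ++ [PySem.List.pyGetD arr r 0] := by
        have := pvWin_succ_right arr l (r - 1) (by omega)
        norm_num at this
        exact this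
      set x := PySem.List.pyGetD arr r 0 with hx
      have hcx : (pvWin arr l r).count x = (pvWin arr l (r - 1)).count x + 1 := by
        rw [hwin, List.count_append, List.count_cons]; simp
      have hf : freq.getD x 0 - 1 = ((pvWin arr l (r - 1)).count x : Int) := by
        rw [hInv.1 x, hcx]; push_cast; ring
      refine ih (r - 1) _ _ (by omega) (by omega) h2 ?_
      constructor
      · intro v
        rw [PySem.Dict.getD_insert]
        by_cases hv : v = x
        · rw [hv, if_pos rfl, hf]
        · rw [if_neg hv, hInv.1 v, hwin, List.count_append, List.count_cons]
          simp [Ne.symm hv]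
      · have hv2 : val = pvT (pvWin arr l (r - 1)) + pvC2 ((pvWin arr l (r - 1)).count x : Int) := by
          rw [hInv.2, hwin, pvT_append]
        rw [hf, hv2]
        unfold pvC2
        ring
    · have hr : r = qr := by omega
      subst hr
      rw [moDelRight, dif_neg (by omega)]
      exact ⟨rfl, hInv⟩

lemma moAddLeft_id (arr : List Int) (ql l : Int) (freq : PySem.Dict Int Int) (val : Int)
    (h : l ≤ ql) : moAddLeft arr ql l freq val = (l, freq, val) := by
  rw [moAddLeft, dif_neg (by omega)]

lemma moAddRight_id (arr : List Int) (qr r : Int) (freq : PySem.Dict Int Int) (val : Int)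
    (h : qr ≤ r) : moAddRight arr qr r freq val = (r, freq, val) := by
  rw [moAddRight, dif_neg (by omega)]

lemma moAddLeft_full (arr : List Int) (r ql l : Int) (freq : PySem.Dict Int Int) (val : Int)
    (hlr : l ≤ r + 1) (hInv : pvInv arr l r freq val) :
    (moAddLeft arr ql l freq val).1 = min ql l ∧
    pvInv arr (min ql l) r (moAddLeft arr ql l freq val).2.1 (moAddLeft arr ql l freq val).2.2 := by
  rcases le_total ql l with h | h
  · rw [min_eq_left h]
    exact moAddLeft_spec arr r ql (l - ql).toNat l freq val le_rfl h hlr hInv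
  · rw [min_eq_right h, moAddLeft_id arr ql l freq val h]
    exact ⟨rfl, hInv⟩

lemma moAddRight_full (arr : List Int) (l qr r : Int) (freq : PySem.Dict Int Int) (val : Int)
    (hlr : l ≤ r + 1) (hInv : pvInv arr l r freq val) :
    (moAddRight arr qr r freq val).1 = max qr r ∧
    pvInv arr l (max qr r) (moAddRight arr qr r freq val).2.1 (moAddRight arr qr r freq val).2.2 := by
  rcases le_total r qr with h | h
  · rw [max_eq_left h]
    exact moAddRight_spec arr l qr (qr - r).toNat r freq val le_rfl h hlr hInv
  · rw [max_eq_right h, moAddRight_id arr qr r freq val h]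
    exact ⟨rfl, hInv⟩

lemma moStep_spec (arr : List Int) (l r : Int) (freq : PySem.Dict Int Int) (val : Int)
    (res : List Int) (q : Int × Int × Int) (hlr : l ≤ r + 1) (hq : q.2.1 ≤ q.2.2 + 1)
    (hInv : pvInv arr l r freq val) :
    (moStep arr (l, r, freq, val, res) q).1 = q.2.1 ∧
    (moStep arr (l, r, freq, val, res) q).2.1 = q.2.2 ∧
    pvInv arr q.2.1 q.2.2 (moStep arr (l, r, freq, val, res) q).2.2.1
      (moStep arr (l, r, freq, val, res) q).2.2.2.1 ∧
    (moStep arr (l, r, freq, val, res) q).2.2.2.2 =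
      PySem.List.pySetD res q.1 (pvT (pvWin arr q.2.1 q.2.2)) := by
  obtain ⟨qi, ql, qr⟩ := q
  simp only at hq
  have h1 := moAddLeft_full arr r ql l freq val hlr hInv
  have h2 := moAddRight_full arr (min ql l) qr r
    (moAddLeft arr ql l freq val).2.1 (moAddLeft arr ql l freq val).2.2 (by omega) h1.2
  have h3 := moDelLeft_spec arr (max qr r) ql (ql - min ql l).toNat (min ql l)
    (moAddRight arr qr r (moAddLeft arr ql l freq val).2.1 (moAddLeft arr ql l freq val).2.2).2.1
    (moAddRight arr qr r (moAddLeft arr ql l freq val).2.1 (moAddLeft arr ql l freq val).2.2).2.2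
    le_rfl (by omega) (by omega) h2.2
  have h4 := moDelRight_spec arr ql qr (max qr r - qr).toNat (max qr r)
    (moDelLeft arr ql (min ql l)
      (moAddRight arr qr r (moAddLeft arr ql l freq val).2.1 (moAddLeft arr ql l freq val).2.2).2.1
      (moAddRight arr qr r (moAddLeft arr ql l freq val).2.1 (moAddLeft arr ql l freq val).2.2).2.2).2.1
    (moDelLeft arr ql (min ql l)
      (moAddRight arr qr r (moAddLeft arr ql l freq val).2.1 (moAddLeft arr ql l freq val).2.2).2.1
      (moAddRight arr qr r (moAddLeft arr ql l freq val).2.1 (moAddLeft arr ql l freq val).2.2).2.2).2.2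
    le_rfl (by omega) (by omega) h3.2
  simp only [moStep, h1.1, h2.1]
  refine ⟨h3.1, h4.1, h4.2, ?_⟩
  rw [(h4.2).2]

lemma moFold_spec (arr : List Int) :
    ∀ (S : List (Int × Int × Int)) (l r : Int) (freq : PySem.Dict Int Int) (val : Int)
      (res : List Int), l ≤ r + 1 → pvInv arr l r freq val → (∀ p ∈ S, p.2.1 ≤ p.2.2 + 1) →
      (S.foldl (moStep arr) (l, r, freq, val, res)).2.2.2.2 =
        S.foldl (fun res p => PySem.List.pySetD res p.1 (pvT (pvWin arr p.2.1 p.2.2))) res := by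
  intro S
  induction S with
  | nil => intro l r freq val res _ _ _; rfl
  | cons p S ih =>
    intro l r freq val res hlr hInv hS
    have hs := moStep_spec arr l r freq val res p hlr (hS p List.mem_cons_self) hInv
    simp only [List.foldl_cons]
    have hst : moStep arr (l, r, freq, val, res) p =
        (p.2.1, p.2.2, (moStep arr (l, r, freq, val, res) p).2.2.1,
         (moStep arr (l, r, freq, val, res) p).2.2.2.1,
         PySem.List.pySetD res p.1 (pvT (pvWin arr p.2.1 p.2.2))) := by
      obtain ⟨e1, e2, _, e4⟩ := hs
      exact Prod.ext e1 (Prod.ext e2 (Prod.ext rfl (Prod.ext rfl e4)))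
    rw [hst]
    exact ih p.2.1 p.2.2 _ _ _ (hS p List.mem_cons_self) hs.2.2.1 (fun p hp => hS p (List.mem_cons_of_mem _ hp))

lemma pvSetD_eq_set (xs : List Int) (n : Nat) (v : Int) (h : n < xs.length) :
    PySem.List.pySetD xs (n : Int) v = xs.set n v := by
  simp [PySem.List.pySetD, PySem.List.pySet?, PySem.List.pyIdx?, h]

lemma setFold_getElem? (queries : List (Int × Int)) (g : Int × Int → Int) :
    ∀ (S : List (Int × Int × Int)) (res : List Int),
      (∀ p ∈ S, ∃ k : Nat, ∃ _ : k < queries.length, p = ((k : Int), queries[k])) →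
      res.length = queries.length →
      ((S.foldl (fun res p => PySem.List.pySetD res p.1 (g p.2)) res).length = queries.length ∧
       ∀ (j : Nat) (hj : j < queries.length),
        (S.foldl (fun res p => PySem.List.pySetD res p.1 (g p.2)) res)[j]? =
          if ((j : Int)) ∈ S.map (·.1) then some (g (queries[j]'hj)) else res[j]?) := by
  intro S
  induction S with
  | nil =>
    intro res _ hlen
    refine ⟨hlen, ?_⟩
    intro j hj
    simp
  | cons p S ih =>
    intro res hmem hlen
    obtain ⟨k, hk, hp⟩ := hmem p List.mem_cons_self
    have hset : PySem.List.pySetD res p.1 (g p.2) = res.set k (g (queries[k]'hk)) := by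
      rw [hp]
      exact pvSetD_eq_set res k _ (by omega)
    have hlen' : (res.set k (g (queries[k]'hk))).length = queries.length := by
      simp [hlen]
    have IH := ih (res.set k (g (queries[k]'hk)))
      (fun p hp => hmem p (List.mem_cons_of_mem _ hp)) hlen'
    simp only [List.foldl_cons, hset]
    refine ⟨IH.1, ?_⟩
    intro j hj
    rw [IH.2 j hj]
    by_cases hs : ((j : Int)) ∈ S.map (·.1)
    · rw [if_pos hs, if_pos (by simp [hs])]
    · rw [if_neg hs]
      by_cases hjk : j = k
      · subst hjk
        rw [if_pos (by rw [hp]; simp), List.getElem?_set_self (by omega)]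
      · have : ((j : Int)) ≠ p.1 := by rw [hp]; simpa using fun h => hjk (by exact_mod_cast h)
        rw [if_neg (by simp [hs, this]), List.getElem?_set_ne (by omega : k ≠ j)]

lemma alt_eq_pvT (arr : List Int) (q : Int × Int) :
    ((PySem.Dict.counter (pvWin arr q.1 q.2)).values.map
      (fun c => PySem.Int.floordiv (c * (c - 1) * (c - 2)) 6)).sum = pvT (pvWin arr q.1 q.2) := by
  set xs := pvWin arr q.1 q.2 with hxs
  have hts : (PySem.Set.ofList xs : List Int).toFinset = xs.toFinset := by
    ext v; simp [PySem.Set.mem_ofList]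
  rw [pvT, ← hts, List.sum_toFinset _ (PySem.Set.nodup_ofList xs)]
  simp only [PySem.Dict.values, PySem.Dict.items_counter, List.map_map]
  rfl

-- ===== VERDICT (by name: the statement is the Claim_ definition above) =====
theorem mos_algorithm_spec : Claim_equal_mos_algorithm := by
  intro arr queries _ hPre
  unfold Spec_mos_algorithm
  obtain ⟨-, hPre2⟩ := hPre
  simp only [mos_algorithm]
  set key := fun x : Int × Int × Int => PySem.Int.floordiv x.2.1 ((Nat.sqrt arr.length : Nat) : Int) with hkey
  set S := PySem.List.sorted (PySem.List.enumerate queries) key with hS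
  have hperm : S.Perm (PySem.List.enumerate queries) :=
    PySem.List.sorted_perm (PySem.List.enumerate queries) key false
  have hSmem : ∀ p ∈ S, ∃ k : Nat, ∃ _ : k < queries.length, p = ((k : Int), queries[k]) := by
    intro p hp
    have := (PySem.List.mem_enumerate_iff queries 0 p).mp (hperm.subset hp)
    obtain ⟨k, hk, hpk⟩ := this
    exact ⟨k, hk, by simpa using hpk⟩
  have hS2 : ∀ p ∈ S, p.2.1 ≤ p.2.2 + 1 := by
    intro p hp
    obtain ⟨k, hk, hpk⟩ := hSmem p hp
    subst hpk
    exact (hPre2 queries[k] (List.getElem_mem hk)).2.1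
  have hInit : pvInv arr 0 (-1) (PySem.Dict.empty) 0 := by
    have hwin : pvWin arr 0 (-1) = [] := by
      unfold pvWin
      rw [show (-1 : Int) + 1 = 0 by ring, PySem.List.pyRange_one_eq_nil le_rfl]
      rfl
    constructor
    · intro v; rw [hwin]; simp [pysem]
    · rw [hwin]; simp [pvT]
  rw [moFold_spec arr S 0 (-1) PySem.Dict.empty 0 (List.replicate queries.length 0) (by omega) hInit hS2]
  have hsf := setFold_getElem? queries (fun q => pvT (pvWin arr q.1 q.2)) S
    (List.replicate queries.length 0) hSmem (List.length_replicate)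
  have hlenB : (mos_algorithm_alt arr queries).length = queries.length := by
    simp [mos_algorithm_alt]
  refine List.ext_getElem? ?_
  intro j
  by_cases hj : j < queries.length
  · rw [hsf.2 j hj]
    have hcov : ((j : Int)) ∈ S.map (·.1) := by
      refine List.mem_map.mpr ⟨((j : Int), queries[j]), ?_, rfl⟩
      exact hperm.mem_iff.mpr ((PySem.List.mem_enumerate_iff queries 0 _).mpr ⟨j, hj, by simp⟩)
    rw [if_pos hcov]
    have : (mos_algorithm_alt arr queries)[j]? = some (pvT (pvWin arr (queries[j]'hj).1 (queries[j]'hj).2)) := by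
      simp only [mos_algorithm_alt]
      rw [List.getElem?_map, List.getElem?_eq_getElem hj]
      simp only [Option.map_some]
      congr 1
      exact alt_eq_pvT arr (queries[j]'hj)
    rw [this]
  · have hlenA : (List.foldl (fun res p => PySem.List.pySetD res p.1 (pvT (pvWin arr p.2.1 p.2.2)))
        (List.replicate queries.length 0) S).length = queries.length := hsf.1
    rw [List.getElem?_eq_none (by rw [hlenA]; omega),
        List.getElem?_eq_none (by rw [hlenB]; omega)]
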